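-- pv_equiv track=rewrite | github.com/gnahuy123/liftSim | app/core/algorithms.py | pick_next_direction
-- ===== SOURCE A (Python) =====
-- def pick_next_direction(current_level: int, current_direction: str, stops: dict) -> str:
--     if not stops:
--         return "idle"
--
--     floors = list(stops.keys())
--     distances = [abs(f - current_level) for f in floors]
--     min_dist = min(distances)
--
--     candidates = [f for f in floors if abs(f - current_level) == min_dist]
--
--     if len(candidates) == 1:
--         target = candidates[0]
--     else:
--         # If equal distance, keep current direction if possible
--         if current_direction == "up" and any(f > current_level for f in candidates):
--             target = min(f for f in candidates if f > current_level)
--         elif current_direction == "down" and any(f < current_level for f in candidates):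
--             target = max(f for f in candidates if f < current_level)
--         else:
--             target = candidates[0]
--
--     if target > current_level:
--         return "up"
--     elif target < current_level:
--         return "down"
--     return "idle"
-- ===== SOURCE B (Python) =====
-- def pick_next_direction(current_level: int, current_direction: str, stops: dict) -> str:
--     best = None
--     for f in stops:
--         d = abs(f - current_level)
--         if best is None or d < abs(best - current_level):
--             best = f
--         elif d == abs(best - current_level):
--             if current_direction == "up" and f > current_level:
--                 best = f
--             elif current_direction == "down" and f < current_level:
--                 best = f
--     if best is None or best == current_level:
--         return "idle"
--     return "up" if best > current_level else "down"
-- ===== Notes on version B (the rewrite author's own statement) =====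
-- stated objective: simpler
-- what changed: Replaces A's five passes (distance list, min, candidate filter, any-scans, min/max over generators) by one single pass that keeps a running best floor with the tie-break applied inline.
import Mathlib
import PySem

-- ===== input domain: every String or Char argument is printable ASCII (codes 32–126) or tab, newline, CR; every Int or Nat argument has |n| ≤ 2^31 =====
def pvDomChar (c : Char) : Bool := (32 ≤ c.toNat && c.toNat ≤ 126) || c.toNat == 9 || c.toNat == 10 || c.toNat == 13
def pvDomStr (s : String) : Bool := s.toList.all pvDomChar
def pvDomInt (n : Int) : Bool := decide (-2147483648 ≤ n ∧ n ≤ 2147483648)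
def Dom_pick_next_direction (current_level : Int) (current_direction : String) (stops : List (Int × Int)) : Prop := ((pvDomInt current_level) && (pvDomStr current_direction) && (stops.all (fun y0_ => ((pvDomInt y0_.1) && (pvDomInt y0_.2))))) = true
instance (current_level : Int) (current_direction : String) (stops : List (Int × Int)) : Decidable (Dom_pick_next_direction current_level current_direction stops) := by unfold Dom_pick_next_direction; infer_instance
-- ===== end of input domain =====

-- B replaces A's multiple passes (distance list, min, candidate filter, any-scans, min/max) by one
-- single pass keeping a running best floor with the tie-break applied inline (objective: simpler).

-- ===== PORT A =====
def pick_next_direction (current_level : Int) (current_direction : String) (stops : List (Int × Int)) : String :=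
  if stops = [] then "idle"
  else
    let floors := PySem.List.dedup (stops.map Prod.fst)
    let distances := floors.map (fun f => |f - current_level|)
    -- floors is nonempty here, so Python's min cannot raise; getD's default is unreachable
    let min_dist := (PySem.List.min? distances (fun y => y)).getD 0
    let candidates := floors.filter (fun f => decide (|f - current_level| = min_dist))
    let target :=
      if candidates.length = 1 then candidates.headD 0
      else if current_direction = "up" ∧ candidates.any (fun f => decide (current_level < f)) then
        -- the generator is nonempty here (guarded by any), so min never raises
        (PySem.List.min? (candidates.filter (fun f => decide (current_level < f))) (fun y => y)).getD 0
      else if current_direction = "down" ∧ candidates.any (fun f => decide (f < current_level)) then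
        (PySem.List.max? (candidates.filter (fun f => decide (f < current_level))) (fun y => y)).getD 0
      else candidates.headD 0
    if current_level < target then "up"
    else if target < current_level then "down"
    else "idle"

-- ===== PORT B =====
def pick_next_direction_alt (current_level : Int) (current_direction : String) (stops : List (Int × Int)) : String :=
  let best := (PySem.List.dedup (stops.map Prod.fst)).foldl
    (fun best f =>
      match best with
      | none => some f
      | some b =>
        if |f - current_level| < |b - current_level| then some f
        else if |f - current_level| = |b - current_level| then
          if current_direction = "up" ∧ current_level < f then some f
          else if current_direction = "down" ∧ f < current_level then some f
          else some b
        else some b) none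
  match best with
  | none => "idle"
  | some t =>
    if current_level < t then "up"
    else if t < current_level then "down"
    else "idle"

-- ===== PRECONDITION & SPEC =====
def Spec_pick_next_direction (current_level : Int) (current_direction : String) (stops : List (Int × Int)) (out : String) : Prop := out = pick_next_direction_alt current_level current_direction stops
instance (current_level : Int) (current_direction : String) (stops : List (Int × Int)) (out : String) : Decidable (Spec_pick_next_direction current_level current_direction stops out) := by unfold Spec_pick_next_direction; infer_instance

-- ===== CLAIM (what is proved, stated in full; the proofs are below) =====
def Claim_equal_pick_next_direction : Prop := ∀ (current_level : Int) (current_direction : String) (stops : List (Int × Int)), Dom_pick_next_direction current_level current_direction stops → Spec_pick_next_direction current_level current_direction stops (pick_next_direction current_level current_direction stops)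

-- ===== LEMMAS AND PROOFS =====

-- B's loop body, named for the proofs (definitionally the lambda in pick_next_direction_alt)
def pvStep (cl : Int) (cd : String) : Option Int → Int → Option Int := fun best f =>
  match best with
  | none => some f
  | some b =>
    if |f - cl| < |b - cl| then some f
    else if |f - cl| = |b - cl| then
      if cd = "up" ∧ cl < f then some f
      else if cd = "down" ∧ f < cl then some f
      else some b
    else some b

-- running minimum distance after seeing b then fs
def pvMd (cl b : Int) (fs : List Int) : Int := (fs.map (fun f => |f - cl|)).foldl min |b - cl|

lemma pvAbs_up (cl x d : Int) (h : |x - cl| = d) (hx : cl < x) : x = cl + d := by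
  rcases abs_cases (x - cl) with ⟨h1, h2⟩ | ⟨h1, h2⟩ <;> omega

lemma pvAbs_down (cl x d : Int) (h : |x - cl| = d) (hx : x < cl) : x = cl - d := by
  rcases abs_cases (x - cl) with ⟨h1, h2⟩ | ⟨h1, h2⟩ <;> omega

lemma pvAbs_zero (cl x : Int) (h : |x - cl| = 0) : x = cl := by
  rcases abs_cases (x - cl) with ⟨h1, h2⟩ | ⟨h1, h2⟩ <;> omega

lemma pvAbs_at_up (cl d : Int) (hd : 0 ≤ d) : |(cl + d) - cl| = d := by
  rcases abs_cases ((cl + d) - cl) with ⟨h1, h2⟩ | ⟨h1, h2⟩ <;> omega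

lemma pvAbs_at_down (cl d : Int) (hd : 0 ≤ d) : |(cl - d) - cl| = d := by
  rcases abs_cases ((cl - d) - cl) with ⟨h1, h2⟩ | ⟨h1, h2⟩ <;> omega

lemma pvMd_cons (cl b b' f : Int) (fs : List Int)
    (h : |b' - cl| = min |b - cl| |f - cl|) : pvMd cl b (f :: fs) = pvMd cl b' fs := by
  simp only [pvMd, List.map_cons, List.foldl_cons, h]

lemma pvMd_le (cl b : Int) (fs : List Int) :
    pvMd cl b fs ≤ |b - cl| ∧ ∀ f ∈ fs, pvMd cl b fs ≤ |f - cl| := by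
  have h := PySem.List.foldl_min_le (fs.map (fun f => |f - cl|)) |b - cl|
  exact ⟨h.1, fun f hf => h.2 _ (List.mem_map_of_mem hf)⟩

lemma pvMd_nonneg (cl b : Int) (fs : List Int) : 0 ≤ pvMd cl b fs := by
  rcases PySem.List.foldl_min_mem (fs.map (fun f => |f - cl|)) |b - cl| with h | h
  · rw [pvMd, h]; exact abs_nonneg _
  · rw [pvMd]
    obtain ⟨f, _, hf⟩ := List.mem_map.1 h
    rw [← hf]; exact abs_nonneg _

lemma pvMin?_const (l : List Int) (v : Int) (hne : l ≠ []) (h : ∀ y ∈ l, y = v) :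
    PySem.List.min? l (fun y => y) = some v := by
  cases hm : PySem.List.min? l (fun y => y) with
  | none => exact absurd ((PySem.List.min?_eq_none_iff _ _).1 hm) hne
  | some m => rw [h m (PySem.List.min?_mem hm)]

lemma pvMax?_const (l : List Int) (v : Int) (hne : l ≠ []) (h : ∀ y ∈ l, y = v) :
    PySem.List.max? l (fun y => y) = some v := by
  cases hm : PySem.List.max? l (fun y => y) with
  | none => exact absurd ((PySem.List.max?_eq_none_iff _ _).1 hm) hne
  | some m => rw [h m (PySem.List.max?_mem hm)]

-- invariant of B's single pass: the fold result is a closest floor, prefers the above/below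
-- closest floor in the directional cases, and is the FIRST closest floor otherwise
lemma pvFold_char (cl : Int) (cd : String) (fs : List Int) : ∀ (b : Int),
    ∃ t, fs.foldl (pvStep cl cd) (some b) = some t ∧
      t ∈ b :: fs ∧
      |t - cl| = pvMd cl b fs ∧
      (cd = "up" → cl + pvMd cl b fs ∈ b :: fs → 0 < pvMd cl b fs → t = cl + pvMd cl b fs) ∧
      (cd = "down" → cl - pvMd cl b fs ∈ b :: fs → 0 < pvMd cl b fs → t = cl - pvMd cl b fs) ∧
      (¬(cd = "up" ∧ cl + pvMd cl b fs ∈ b :: fs) → ¬(cd = "down" ∧ cl - pvMd cl b fs ∈ b :: fs) →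
        (b :: fs).find? (fun f => decide (|f - cl| = pvMd cl b fs)) = some t) := by
  induction fs with
  | nil =>
    intro b
    refine ⟨b, rfl, by simp, by simp [pvMd], ?_, ?_, ?_⟩
    · intro _ hmem _; have := List.mem_singleton.1 hmem; omega
    · intro _ hmem _; have := List.mem_singleton.1 hmem; omega
    · intro _ _; simp [pvMd]
  | cons f fs ih =>
    intro b
    by_cases hlt : |f - cl| < |b - cl|
    · -- strictly closer: f replaces b
      obtain ⟨t, hf, hmem, hd, hup, hdown, hfirst⟩ := ih f
      have hmd : pvMd cl b (f :: fs) = pvMd cl f fs := pvMd_cons cl b f f fs (min_eq_right hlt.le).symm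
      have hle := pvMd_le cl f fs
      have hnn := pvMd_nonneg cl f fs
      have hstep : (f :: fs).foldl (pvStep cl cd) (some b) = fs.foldl (pvStep cl cd) (some f) := by
        simp [List.foldl_cons, pvStep, hlt]
      rw [hmd, hstep]
      refine ⟨t, hf, List.mem_cons_of_mem b hmem, hd, ?_, ?_, ?_⟩
      · intro h1 h2 h3
        refine hup h1 ?_ h3
        rcases List.mem_cons.1 h2 with hb2 | h2'
        · exfalso
          have hb : |b - cl| = pvMd cl f fs := by rw [← hb2]; exact pvAbs_at_up cl _ hnn
          linarith [hle.1]
        · exact h2'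
      · intro h1 h2 h3
        refine hdown h1 ?_ h3
        rcases List.mem_cons.1 h2 with hb2 | h2'
        · exfalso
          have hb : |b - cl| = pvMd cl f fs := by rw [← hb2]; exact pvAbs_at_down cl _ hnn
          linarith [hle.1]
        · exact h2'
      · intro hn1 hn2
        have hfst := hfirst (fun hc => hn1 ⟨hc.1, List.mem_cons_of_mem b hc.2⟩)
          (fun hc => hn2 ⟨hc.1, List.mem_cons_of_mem b hc.2⟩)
        have hpb : (fun g => decide (|g - cl| = pvMd cl f fs)) b = false := by
          simp only [decide_eq_false_iff_not]
          intro h; linarith [hle.1]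
        rw [List.find?_cons_of_neg (p := fun g => decide (|g - cl| = pvMd cl f fs)) (by simp [hpb])]
        exact hfst
    · by_cases heq : |f - cl| = |b - cl|
      · by_cases hcu : cd = "up" ∧ cl < f
        · -- tie, going up, f kept when above; here the branch keeps f
          obtain ⟨t, hf, hmem, hd, hup, hdown, hfirst⟩ := ih f
          have hmd : pvMd cl b (f :: fs) = pvMd cl f fs := pvMd_cons cl b f f fs (min_eq_right heq.le).symm
          have hle := pvMd_le cl f fs
          have hnn := pvMd_nonneg cl f fs
          have hstep : (f :: fs).foldl (pvStep cl cd) (some b) = fs.foldl (pvStep cl cd) (some f) := by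
            simp [List.foldl_cons, pvStep, heq, hcu]
          rw [hmd, hstep]
          refine ⟨t, hf, List.mem_cons_of_mem b hmem, hd, ?_, ?_, ?_⟩
          · intro h1 h2 h3
            refine hup h1 ?_ h3
            rcases List.mem_cons.1 h2 with hb2 | h2'
            · have hfm : |f - cl| = pvMd cl f fs := by rw [heq, ← hb2]; exact pvAbs_at_up cl _ hnn
              have : f = cl + pvMd cl f fs := pvAbs_up cl f _ hfm hcu.2
              rw [← this]; exact List.mem_cons_self
            · exact h2'
          · intro h1 _ _
            exact absurd (hcu.1.symm.trans h1) (by decide)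
          · intro hn1 hn2
            by_cases hfm : |f - cl| = pvMd cl f fs
            · exfalso
              have : f = cl + pvMd cl f fs := pvAbs_up cl f _ hfm hcu.2
              exact hn1 ⟨hcu.1, by rw [← this]; exact List.mem_cons_of_mem b List.mem_cons_self⟩
            · have hfst := hfirst (fun hc => hn1 ⟨hc.1, List.mem_cons_of_mem b hc.2⟩)
                (fun hc => hn2 ⟨hc.1, List.mem_cons_of_mem b hc.2⟩)
              have hpf : (fun g => decide (|g - cl| = pvMd cl f fs)) f = false := by
                simpa using hfm
              have hpb : (fun g => decide (|g - cl| = pvMd cl f fs)) b = false := by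
                simp only [decide_eq_false_iff_not]
                rw [← heq]; exact hfm
              rw [List.find?_cons_of_neg (p := fun g => decide (|g - cl| = pvMd cl f fs)) (by simp [hpb]), List.find?_cons_of_neg (p := fun g => decide (|g - cl| = pvMd cl f fs)) (by simp [hpf])]
              rw [List.find?_cons_of_neg (p := fun g => decide (|g - cl| = pvMd cl f fs)) (by simp [hpf])] at hfst
              exact hfst
        · by_cases hcd : cd = "down" ∧ f < cl
          · -- tie, going down, f kept when below
            obtain ⟨t, hf, hmem, hd, hup, hdown, hfirst⟩ := ih f
            have hmd : pvMd cl b (f :: fs) = pvMd cl f fs := pvMd_cons cl b f f fs (min_eq_right heq.le).symm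
            have hle := pvMd_le cl f fs
            have hnn := pvMd_nonneg cl f fs
            have hstep : (f :: fs).foldl (pvStep cl cd) (some b) = fs.foldl (pvStep cl cd) (some f) := by
              simp [List.foldl_cons, pvStep, heq, hcd]
            rw [hmd, hstep]
            refine ⟨t, hf, List.mem_cons_of_mem b hmem, hd, ?_, ?_, ?_⟩
            · intro h1 _ _
              exact absurd (hcd.1.symm.trans h1) (by decide)
            · intro h1 h2 h3
              refine hdown h1 ?_ h3
              rcases List.mem_cons.1 h2 with hb2 | h2'
              · have hfm : |f - cl| = pvMd cl f fs := by rw [heq, ← hb2]; exact pvAbs_at_down cl _ hnn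
                have : f = cl - pvMd cl f fs := pvAbs_down cl f _ hfm hcd.2
                rw [← this]; exact List.mem_cons_self
              · exact h2'
            · intro hn1 hn2
              by_cases hfm : |f - cl| = pvMd cl f fs
              · exfalso
                have : f = cl - pvMd cl f fs := pvAbs_down cl f _ hfm hcd.2
                exact hn2 ⟨hcd.1, by rw [← this]; exact List.mem_cons_of_mem b List.mem_cons_self⟩
              · have hfst := hfirst (fun hc => hn1 ⟨hc.1, List.mem_cons_of_mem b hc.2⟩)
                  (fun hc => hn2 ⟨hc.1, List.mem_cons_of_mem b hc.2⟩)
                have hpf : (fun g => decide (|g - cl| = pvMd cl f fs)) f = false := by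
                  simpa using hfm
                have hpb : (fun g => decide (|g - cl| = pvMd cl f fs)) b = false := by
                  simp only [decide_eq_false_iff_not]
                  rw [← heq]; exact hfm
                rw [List.find?_cons_of_neg (p := fun g => decide (|g - cl| = pvMd cl f fs)) (by simp [hpb]), List.find?_cons_of_neg (p := fun g => decide (|g - cl| = pvMd cl f fs)) (by simp [hpf])]
                rw [List.find?_cons_of_neg (p := fun g => decide (|g - cl| = pvMd cl f fs)) (by simp [hpf])] at hfst
                exact hfst
          · -- tie, no directional preference applies: b kept
            obtain ⟨t, hf, hmem, hd, hup, hdown, hfirst⟩ := ih b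
            have hmd : pvMd cl b (f :: fs) = pvMd cl b fs := pvMd_cons cl b b f fs (min_eq_left heq.ge).symm
            have hle := pvMd_le cl b fs
            have hnn := pvMd_nonneg cl b fs
            have hstep : (f :: fs).foldl (pvStep cl cd) (some b) = fs.foldl (pvStep cl cd) (some b) := by
              simp [List.foldl_cons, pvStep, heq, hcu, hcd]
            rw [hmd, hstep]
            refine ⟨t, hf, ?_, hd, ?_, ?_, ?_⟩
            · rcases List.mem_cons.1 hmem with h | h
              · rw [h]; exact List.mem_cons_self
              · exact List.mem_cons_of_mem b (List.mem_cons_of_mem f h)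
            · intro h1 h2 h3
              refine hup h1 ?_ h3
              rcases List.mem_cons.1 h2 with hb2 | h2'
              · rw [hb2]; exact List.mem_cons_self
              · rcases List.mem_cons.1 h2' with hf2 | h2''
                · exfalso
                  exact hcu ⟨h1, by rw [← hf2]; omega⟩
                · exact List.mem_cons_of_mem b h2''
            · intro h1 h2 h3
              refine hdown h1 ?_ h3
              rcases List.mem_cons.1 h2 with hb2 | h2'
              · rw [hb2]; exact List.mem_cons_self
              · rcases List.mem_cons.1 h2' with hf2 | h2''
                · exfalso
                  exact hcd ⟨h1, by rw [← hf2]; omega⟩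
                · exact List.mem_cons_of_mem b h2''
            · intro hn1 hn2
              have hfst := hfirst
                (fun hc => hn1 ⟨hc.1, by
                  rcases List.mem_cons.1 hc.2 with h | h
                  · rw [h]; exact List.mem_cons_self
                  · exact List.mem_cons_of_mem b (List.mem_cons_of_mem f h)⟩)
                (fun hc => hn2 ⟨hc.1, by
                  rcases List.mem_cons.1 hc.2 with h | h
                  · rw [h]; exact List.mem_cons_self
                  · exact List.mem_cons_of_mem b (List.mem_cons_of_mem f h)⟩)
              by_cases hpb : |b - cl| = pvMd cl b fs
              · have hpb' : (fun g => decide (|g - cl| = pvMd cl b fs)) b = true := by simpa using hpb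
                rw [List.find?_cons_of_pos (p := fun g => decide (|g - cl| = pvMd cl b fs)) hpb']
                rw [List.find?_cons_of_pos (p := fun g => decide (|g - cl| = pvMd cl b fs)) hpb'] at hfst
                exact hfst
              · have hpb' : (fun g => decide (|g - cl| = pvMd cl b fs)) b = false := by simpa using hpb
                have hpf' : (fun g => decide (|g - cl| = pvMd cl b fs)) f = false := by
                  simp only [decide_eq_false_iff_not]
                  rw [heq]; exact hpb
                rw [List.find?_cons_of_neg (p := fun g => decide (|g - cl| = pvMd cl b fs)) (by simp [hpb']), List.find?_cons_of_neg (p := fun g => decide (|g - cl| = pvMd cl b fs)) (by simp [hpf'])]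
                rw [List.find?_cons_of_neg (p := fun g => decide (|g - cl| = pvMd cl b fs)) (by simp [hpb'])] at hfst
                exact hfst
      · -- strictly farther: b kept
        have hgt : |b - cl| < |f - cl| := lt_of_le_of_ne (not_lt.1 hlt) (fun h => heq h.symm)
        obtain ⟨t, hf, hmem, hd, hup, hdown, hfirst⟩ := ih b
        have hmd : pvMd cl b (f :: fs) = pvMd cl b fs := pvMd_cons cl b b f fs (min_eq_left hgt.le).symm
        have hle := pvMd_le cl b fs
        have hnn := pvMd_nonneg cl b fs
        have hstep : (f :: fs).foldl (pvStep cl cd) (some b) = fs.foldl (pvStep cl cd) (some b) := by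
          simp [List.foldl_cons, pvStep, hlt, heq]
        rw [hmd, hstep]
        refine ⟨t, hf, ?_, hd, ?_, ?_, ?_⟩
        · rcases List.mem_cons.1 hmem with h | h
          · rw [h]; exact List.mem_cons_self
          · exact List.mem_cons_of_mem b (List.mem_cons_of_mem f h)
        · intro h1 h2 h3
          refine hup h1 ?_ h3
          rcases List.mem_cons.1 h2 with hb2 | h2'
          · rw [hb2]; exact List.mem_cons_self
          · rcases List.mem_cons.1 h2' with hf2 | h2''
            · exfalso
              have hfm : |f - cl| = pvMd cl b fs := by rw [← hf2]; exact pvAbs_at_up cl _ hnn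
              linarith [hle.1]
            · exact List.mem_cons_of_mem b h2''
        · intro h1 h2 h3
          refine hdown h1 ?_ h3
          rcases List.mem_cons.1 h2 with hb2 | h2'
          · rw [hb2]; exact List.mem_cons_self
          · rcases List.mem_cons.1 h2' with hf2 | h2''
            · exfalso
              have hfm : |f - cl| = pvMd cl b fs := by rw [← hf2]; exact pvAbs_at_down cl _ hnn
              linarith [hle.1]
            · exact List.mem_cons_of_mem b h2''
        · intro hn1 hn2
          have hfst := hfirst
            (fun hc => hn1 ⟨hc.1, by
              rcases List.mem_cons.1 hc.2 with h | h
              · rw [h]; exact List.mem_cons_self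
              · exact List.mem_cons_of_mem b (List.mem_cons_of_mem f h)⟩)
            (fun hc => hn2 ⟨hc.1, by
              rcases List.mem_cons.1 hc.2 with h | h
              · rw [h]; exact List.mem_cons_self
              · exact List.mem_cons_of_mem b (List.mem_cons_of_mem f h)⟩)
          have hpf' : (fun g => decide (|g - cl| = pvMd cl b fs)) f = false := by
            simp only [decide_eq_false_iff_not]
            intro h; linarith [hle.1]
          by_cases hpb : |b - cl| = pvMd cl b fs
          · have hpb' : (fun g => decide (|g - cl| = pvMd cl b fs)) b = true := by simpa using hpb
            rw [List.find?_cons_of_pos (p := fun g => decide (|g - cl| = pvMd cl b fs)) hpb']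
            rw [List.find?_cons_of_pos (p := fun g => decide (|g - cl| = pvMd cl b fs)) hpb'] at hfst
            exact hfst
          · have hpb' : (fun g => decide (|g - cl| = pvMd cl b fs)) b = false := by simpa using hpb
            rw [List.find?_cons_of_neg (p := fun g => decide (|g - cl| = pvMd cl b fs)) (by simp [hpb']), List.find?_cons_of_neg (p := fun g => decide (|g - cl| = pvMd cl b fs)) (by simp [hpf'])]
            rw [List.find?_cons_of_neg (p := fun g => decide (|g - cl| = pvMd cl b fs)) (by simp [hpb'])] at hfst
            exact hfst

-- ===== VERDICT (by name: the statement is the Claim_ definition above) =====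
lemma pvTarget (cl : Int) (cd : String) (x : Int) (rest : List Int) (t : Int)
    (hmem : t ∈ x :: rest) (hdist : |t - cl| = pvMd cl x rest)
    (hup : cd = "up" → cl + pvMd cl x rest ∈ x :: rest → 0 < pvMd cl x rest → t = cl + pvMd cl x rest)
    (hdown : cd = "down" → cl - pvMd cl x rest ∈ x :: rest → 0 < pvMd cl x rest → t = cl - pvMd cl x rest)
    (hfirst : ¬(cd = "up" ∧ cl + pvMd cl x rest ∈ x :: rest) → ¬(cd = "down" ∧ cl - pvMd cl x rest ∈ x :: rest) →
      List.find? (fun f => decide (|f - cl| = pvMd cl x rest)) (x :: rest) = some t) :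
    (if (List.filter (fun f => decide (|f - cl| = pvMd cl x rest)) (x :: rest)).length = 1 then
       (List.filter (fun f => decide (|f - cl| = pvMd cl x rest)) (x :: rest)).headD 0
     else if cd = "up" ∧ ((List.filter (fun f => decide (|f - cl| = pvMd cl x rest)) (x :: rest)).any fun f => decide (cl < f)) = true then
       (PySem.List.min? (List.filter (fun f => decide (cl < f)) (List.filter (fun f => decide (|f - cl| = pvMd cl x rest)) (x :: rest))) fun y => y).getD 0
     else if cd = "down" ∧ ((List.filter (fun f => decide (|f - cl| = pvMd cl x rest)) (x :: rest)).any fun f => decide (f < cl)) = true then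
       (PySem.List.max? (List.filter (fun f => decide (f < cl)) (List.filter (fun f => decide (|f - cl| = pvMd cl x rest)) (x :: rest))) fun y => y).getD 0
     else (List.filter (fun f => decide (|f - cl| = pvMd cl x rest)) (x :: rest)).headD 0) = t := by
  set m := pvMd cl x rest with hm
  set C := List.filter (fun f => decide (|f - cl| = m)) (x :: rest) with hCdef
  have hnn : 0 ≤ m := hm ▸ pvMd_nonneg cl x rest
  have htC : t ∈ C := List.mem_filter.2 ⟨hmem, by simp [hdist]⟩
  have hCmem : ∀ c ∈ C, c ∈ x :: rest ∧ |c - cl| = m := fun c hc =>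
    ⟨(List.mem_filter.1 hc).1, by simpa using (List.mem_filter.1 hc).2⟩
  rcases eq_or_lt_of_le hnn with hm0 | hmpos
  · -- minimum distance 0: every candidate is cl itself
    have hall : ∀ c ∈ C, c = cl := fun c hc => pvAbs_zero cl c (by rw [(hCmem c hc).2, ← hm0])
    have ht : t = cl := hall t htC
    have hhead : C.headD 0 = t := by
      cases hC : C with
      | nil => rw [hC] at htC; exact absurd htC (List.not_mem_nil)
      | cons c cs =>
        have : c = cl := hall c (by rw [hC]; exact List.mem_cons_self)
        simp [this, ht]
    have hanyup : (C.any fun f => decide (cl < f)) = false := by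
      simp only [List.any_eq_false, decide_eq_true_eq]
      intro c hc; simp [hall c hc]
    have hanydn : (C.any fun f => decide (f < cl)) = false := by
      simp only [List.any_eq_false, decide_eq_true_eq]
      intro c hc; simp [hall c hc]
    split_ifs with h1 h2 h3
    · exact hhead
    · exact absurd h2.2 (by simp [hanyup])
    · exact absurd h3.2 (by simp [hanydn])
    · exact hhead
  · by_cases h1 : C.length = 1
    · obtain ⟨c, hc⟩ := List.length_eq_one_iff.1 h1
      rw [hc] at htC
      have htc : t = c := by simpa using htC
      rw [if_pos h1, hc]
      simp [htc]
    · rw [if_neg h1]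
      by_cases h2 : cd = "up" ∧ (C.any fun f => decide (cl < f)) = true
      · rw [if_pos h2]
        obtain ⟨c, hcC, hcgt⟩ := List.any_eq_true.1 h2.2
        have hc' := hCmem c hcC
        have hceq : c = cl + m := pvAbs_up cl c m hc'.2 (by simpa using hcgt)
        have ht : t = cl + m := hup h2.1 (hceq ▸ hc'.1) hmpos
        have hne : List.filter (fun f => decide (cl < f)) C ≠ [] := by
          intro h
          have hcm : c ∈ List.filter (fun f => decide (cl < f)) C := List.mem_filter.2 ⟨hcC, hcgt⟩
          rw [h] at hcm
          exact absurd hcm (List.not_mem_nil)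
        have hallv : ∀ y ∈ List.filter (fun f => decide (cl < f)) C, y = cl + m := by
          intro y hy
          have hy' := List.mem_filter.1 hy
          exact pvAbs_up cl y m (hCmem y hy'.1).2 (by simpa using hy'.2)
        rw [pvMin?_const _ _ hne hallv]
        simp [ht]
      · rw [if_neg h2]
        by_cases h3 : cd = "down" ∧ (C.any fun f => decide (f < cl)) = true
        · rw [if_pos h3]
          obtain ⟨c, hcC, hclt⟩ := List.any_eq_true.1 h3.2
          have hc' := hCmem c hcC
          have hceq : c = cl - m := pvAbs_down cl c m hc'.2 (by simpa using hclt)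
          have ht : t = cl - m := hdown h3.1 (hceq ▸ hc'.1) hmpos
          have hne : List.filter (fun f => decide (f < cl)) C ≠ [] := by
            intro h
            have hcm : c ∈ List.filter (fun f => decide (f < cl)) C := List.mem_filter.2 ⟨hcC, hclt⟩
            rw [h] at hcm
            exact absurd hcm (List.not_mem_nil)
          have hallv : ∀ y ∈ List.filter (fun f => decide (f < cl)) C, y = cl - m := by
            intro y hy
            have hy' := List.mem_filter.1 hy
            exact pvAbs_down cl y m (hCmem y hy'.1).2 (by simpa using hy'.2)
          rw [pvMax?_const _ _ hne hallv]
          simp [ht]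
        · rw [if_neg h3]
          have hn1 : ¬(cd = "up" ∧ cl + m ∈ x :: rest) := by
            rintro ⟨hcd', hmm⟩
            refine h2 ⟨hcd', List.any_eq_true.2 ⟨cl + m, List.mem_filter.2 ⟨hmm, by simpa using pvAbs_at_up cl m hnn⟩, by simp only [decide_eq_true_eq]; linarith⟩⟩
          have hn2 : ¬(cd = "down" ∧ cl - m ∈ x :: rest) := by
            rintro ⟨hcd', hmm⟩
            refine h3 ⟨hcd', List.any_eq_true.2 ⟨cl - m, List.mem_filter.2 ⟨hmm, by simpa using pvAbs_at_down cl m hnn⟩, by simp only [decide_eq_true_eq]; linarith⟩⟩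
          have hf := hfirst hn1 hn2
          have hh : C.head? = some t := by rw [hCdef, List.head?_filter]; exact hf
          rw [List.headD_eq_head?_getD, hh]
          rfl

lemma pvCore (cl : Int) (cd : String) (x : Int) (rest : List Int) :
    (let floors := x :: rest
     let distances := floors.map (fun f => |f - cl|)
     let min_dist := (PySem.List.min? distances (fun y => y)).getD 0
     let candidates := floors.filter (fun f => decide (|f - cl| = min_dist))
     let target :=
       if candidates.length = 1 then candidates.headD 0
       else if cd = "up" ∧ candidates.any (fun f => decide (cl < f)) then
         (PySem.List.min? (candidates.filter (fun f => decide (cl < f))) (fun y => y)).getD 0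
       else if cd = "down" ∧ candidates.any (fun f => decide (f < cl)) then
         (PySem.List.max? (candidates.filter (fun f => decide (f < cl))) (fun y => y)).getD 0
       else candidates.headD 0
     if cl < target then "up"
     else if target < cl then "down"
     else "idle") =
    (let best := (x :: rest).foldl (pvStep cl cd) none
     match best with
     | none => "idle"
     | some t =>
       if cl < t then "up"
       else if t < cl then "down"
       else "idle") := by
  have hmin : PySem.List.min? ((x :: rest).map (fun f => |f - cl|)) (fun y => y) = some (pvMd cl x rest) := by
    rw [List.map_cons, PySem.List.min?_id_cons]; rfl
  obtain ⟨t, hfold, hmem, hdist, hup, hdown, hfirst⟩ := pvFold_char cl cd rest x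
  have hfold' : (x :: rest).foldl (pvStep cl cd) none = some t := by
    rw [List.foldl_cons]; exact hfold
  simp only [hmin, Option.getD_some, hfold']
  rw [pvTarget cl cd x rest t hmem hdist hup hdown hfirst]

theorem pick_next_direction_spec : Claim_equal_pick_next_direction := by
  intro cl cd stops _
  unfold Spec_pick_next_direction pick_next_direction pick_next_direction_alt
  by_cases hs : stops = []
  · subst hs; rfl
  · rw [if_neg hs]
    have hne : PySem.List.dedup (stops.map Prod.fst) ≠ [] := by
      intro h
      obtain ⟨p, hp⟩ := List.exists_mem_of_ne_nil stops hs
      have hm : p.1 ∈ PySem.List.dedup (stops.map Prod.fst) :=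
        (PySem.List.mem_dedup _ _).2 (List.mem_map_of_mem hp)
      rw [h] at hm
      exact absurd hm (List.not_mem_nil)
    obtain ⟨x, rest, hxr⟩ := List.exists_cons_of_ne_nil hne
    rw [hxr]
    exact pvCore cl cd x rest
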